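-- pv_equiv track=rewrite | github.com/Mirko-A/minigrad | minitorch/buffer.py | get_strides_from_shape
-- ===== SOURCE A (Python) =====
-- import math
--
-- def get_strides_from_shape(shape: tuple[int, ...]) -> tuple[int, ...]:
--     strides = ()
--     shape_len = len(shape)
--
--     for dim_idx in range(shape_len):
--         # Stride for each dimension is calculated by taking the product
--         # of all the dimension sizes (shapes) proceeding it. The last
--         # dimension always has a stride of 1.
--         if dim_idx == shape_len:
--             strides += (1,)
--         else:
--             strides += (math.prod(shape[dim_idx + 1:]),)
--
--     return strides
-- ===== SOURCE B (Python) =====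
-- def get_strides_from_shape(shape: tuple[int, ...]) -> tuple[int, ...]:
--     strides = []
--     acc = 1
--     for dim in reversed(shape):
--         strides.append(acc)
--         acc *= dim
--     return tuple(reversed(strides))
-- ===== Notes on version B (the rewrite author's own statement) =====
-- stated objective: faster
-- what changed: replaced the per-index product of the whole remaining suffix (a slice plus math.prod for every dimension) with a single right-to-left pass keeping a running product
import Mathlib
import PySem

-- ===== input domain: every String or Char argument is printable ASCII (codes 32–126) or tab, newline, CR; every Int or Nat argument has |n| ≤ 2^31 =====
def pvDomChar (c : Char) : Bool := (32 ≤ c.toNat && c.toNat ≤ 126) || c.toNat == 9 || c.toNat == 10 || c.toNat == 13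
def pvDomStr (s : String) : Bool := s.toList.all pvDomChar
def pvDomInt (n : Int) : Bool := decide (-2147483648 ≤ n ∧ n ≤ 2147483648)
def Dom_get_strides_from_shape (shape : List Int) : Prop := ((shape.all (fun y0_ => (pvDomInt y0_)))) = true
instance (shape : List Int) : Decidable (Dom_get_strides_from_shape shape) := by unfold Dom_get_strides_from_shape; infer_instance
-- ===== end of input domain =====

-- B replaces A's per-index math.prod over the remaining suffix with one right-to-left
-- pass keeping a running product (objective: faster, O(n) instead of O(n^2)).

-- ===== PORT A =====
-- math.prod over a list of ints (product of the elements, starting from 1)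
def pyProd (l : List Int) : Int := l.foldl (· * ·) 1

def get_strides_from_shape (shape : List Int) : List Int :=
  (PySem.List.pyRange 0 (shape.length : Int) 1).foldl
    (fun strides dim_idx =>
      if dim_idx = (shape.length : Int) then strides ++ [1]
      else strides ++ [pyProd (PySem.List.slice shape (some (dim_idx + 1)) none)])
    []

-- ===== PORT B =====
-- the 'for dim in reversed(shape)' loop of Source B: state (acc, strides)
def altLoop : List Int → Int → List Int → List Int
  | [], _, strides => strides
  | dim :: rest, acc, strides => altLoop rest (acc * dim) (strides ++ [acc])

def get_strides_from_shape_alt (shape : List Int) : List Int :=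
  (altLoop shape.reverse 1 []).reverse

-- ===== PRECONDITION & SPEC =====
def Spec_get_strides_from_shape (shape : List Int) (out : List Int) : Prop := out = get_strides_from_shape_alt shape
instance (shape : List Int) (out : List Int) : Decidable (Spec_get_strides_from_shape shape out) := by unfold Spec_get_strides_from_shape; infer_instance

-- ===== CLAIM (what is proved, stated in full; the proofs are below) =====
def Claim_equal_get_strides_from_shape : Prop := ∀ (shape : List Int), Dom_get_strides_from_shape shape → Spec_get_strides_from_shape shape (get_strides_from_shape shape)

-- ===== LEMMAS AND PROOFS =====

-- common reference form: strides shape = [prod (drop 1 shape), prod (drop 2 shape), …, 1]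
def specStrides : List Int → List Int
  | [] => []
  | _ :: xs => xs.prod :: specStrides xs

theorem foldl_mul_int (l : List Int) (a : Int) : l.foldl (· * ·) a = a * l.prod := by
  induction l generalizing a with
  | nil => simp
  | cons x xs ih => simp [List.foldl, ih (a * x), List.prod_cons, mul_assoc]

theorem pyProd_eq (l : List Int) : pyProd l = l.prod := by
  simp [pyProd, foldl_mul_int]

theorem foldl_append_map {α β : Type} (g : α → β) (l : List α) (s : List β) :
    l.foldl (fun st i => st ++ [g i]) s = s ++ l.map g := by
  induction l generalizing s with
  | nil => simp
  | cons x xs ih => simp [List.foldl, ih]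

-- A computes, for each index i < n, the product of shape.drop (i+1)
theorem portA_eq_map (shape : List Int) :
    get_strides_from_shape shape
      = (List.range shape.length).map (fun k => (shape.drop (k + 1)).prod) := by
  unfold get_strides_from_shape
  rw [PySem.List.pyRange_one, List.foldl_map]
  simp only [Int.sub_zero, Int.toNat_natCast]
  refine Eq.trans (PySem.List.foldl_congr_mem _ _
    (fun (st : List Int) (k : Nat) => st ++ [(shape.drop (k + 1)).prod]) [] ?_) ?_
  · intro s k hk
    beta_reduce
    have hk' : k < shape.length := List.mem_range.mp hk
    have hne : ((0 : Int) + (k : Int)) ≠ (shape.length : Int) := by push_cast; omega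
    rw [if_neg hne]
    have h2 : ((0 : Int) + (k : Int)) + 1 = ((k + 1 : Nat) : Int) := by omega
    rw [h2, PySem.List.slice_from_natCast, pyProd_eq]
  · rw [foldl_append_map (fun k => (shape.drop (k + 1)).prod)]
    simp

theorem portA_eq_spec (shape : List Int) : get_strides_from_shape shape = specStrides shape := by
  rw [portA_eq_map]
  induction shape with
  | nil => simp [specStrides]
  | cons x xs ih =>
    simp only [List.length_cons, List.range_succ_eq_map, List.map_cons, List.map_map, specStrides]
    refine congrArg₂ (· :: ·) (by simp) ?_
    rw [← ih]
    apply List.map_congr_left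
    intro k _
    simp [Function.comp, List.drop_succ_cons]

theorem altLoop_eq (l : List Int) (acc : Int) (s : List Int) :
    altLoop l acc s = s ++ altLoop l acc [] := by
  induction l generalizing acc s with
  | nil => simp [altLoop]
  | cons d rest ih =>
    simp only [altLoop]
    rw [ih (acc * d) (s ++ [acc]), ih (acc * d) ([] ++ [acc])]
    simp

theorem altLoop_append (l : List Int) (x acc : Int) :
    altLoop (l ++ [x]) acc [] = altLoop l acc [] ++ [acc * l.prod] := by
  induction l generalizing acc with
  | nil => simp [altLoop, altLoop_eq]
  | cons d rest ih =>
    simp only [List.cons_append, altLoop]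
    rw [altLoop_eq (rest ++ [x]) (acc * d) ([] ++ [acc]), altLoop_eq rest (acc * d) ([] ++ [acc]), ih (acc * d)]
    simp [List.prod_cons, mul_assoc]

theorem portB_eq_spec (shape : List Int) : get_strides_from_shape_alt shape = specStrides shape := by
  induction shape with
  | nil => simp [get_strides_from_shape_alt, altLoop, specStrides]
  | cons x xs ih =>
    unfold get_strides_from_shape_alt at *
    simp only [List.reverse_cons, specStrides]
    rw [altLoop_append xs.reverse x 1]
    simp only [List.reverse_append, List.reverse_cons, List.reverse_nil, List.nil_append,
      List.cons_append, one_mul, List.prod_reverse]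
    rw [ih]

-- ===== VERDICT (by name: the statement is the Claim_ definition above) =====
theorem get_strides_from_shape_spec : Claim_equal_get_strides_from_shape := by
  intro shape _
  unfold Spec_get_strides_from_shape
  rw [portA_eq_spec, portB_eq_spec]
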